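-- pv_equiv track=rewrite | github.com/mchirlin/solutions-knowledge-base | appian_parser/resolution/translation_resolver.py | _find_best_translation
-- ===== SOURCE A (Python) =====
-- def _find_best_translation(translations: dict[str, str], locale: str) -> str:
--     """Find the best translation for the given locale.
--
--     Priority: exact locale → language prefix match → any available.
--     """
--     if locale in translations:
--         return translations[locale]
--
--     lang_prefix = locale.split('-')[0]
--     for key, value in translations.items():
--         if key.split('-')[0] == lang_prefix:
--             return value
--
--     return next(iter(translations.values()))
-- ===== SOURCE B (Python) =====
-- def _find_best_translation(translations: dict[str, str], locale: str) -> str: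
--     """Single-pass argmax: score each entry (2 exact, 1 language-prefix, 0 other),
--     keep the first entry with a strictly higher score than the best so far."""
--     lang_prefix = locale.split('-')[0]
--     best_score = -1
--     best_value = None
--     for key, value in translations.items():
--         score = 2 if key == locale else 1 if key.split('-')[0] == lang_prefix else 0
--         if best_score < score:
--             best_score, best_value = score, value
--     if best_score < 0:
--         return next(iter(translations.values()))
--     return best_value
-- ===== Notes on version B (the rewrite author's own statement) =====
-- stated objective: alternative
-- what changed: A's three tiered passes with early returns (exact lookup, prefix scan, fallback) are merged into one argmax traversal that scores every entry (2 exact / 1 prefix / 0 other) and keeps the first strictly better entry.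
import Mathlib
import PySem

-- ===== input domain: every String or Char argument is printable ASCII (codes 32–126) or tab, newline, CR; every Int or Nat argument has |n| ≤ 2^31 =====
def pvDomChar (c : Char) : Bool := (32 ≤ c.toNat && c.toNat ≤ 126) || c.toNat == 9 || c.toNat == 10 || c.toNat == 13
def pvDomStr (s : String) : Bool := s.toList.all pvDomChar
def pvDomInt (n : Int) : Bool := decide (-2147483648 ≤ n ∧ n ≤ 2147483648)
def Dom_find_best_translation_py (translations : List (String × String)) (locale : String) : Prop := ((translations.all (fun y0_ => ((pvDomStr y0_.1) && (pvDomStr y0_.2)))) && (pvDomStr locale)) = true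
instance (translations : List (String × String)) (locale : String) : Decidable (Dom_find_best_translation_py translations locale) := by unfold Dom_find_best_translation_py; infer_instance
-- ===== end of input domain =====

-- B replaces A's three tiered early-return passes by a single scored argmax fold (alternative decomposition, same cost).
-- The dict is an association list (insertion order, lookup = first match), per the type convention.

-- ===== PORT A =====
-- s.split('-')[0]  (the separator "-" is non-empty, so split? is always `some` and index 0 always exists)
def pvPrefix (s : String) : String := PySem.List.pyGetD ((PySem.Str.split? s "-").getD []) 0 ""

-- the loop 'for key, value in translations.items(): if key.split('-')[0] == lang_prefix: return value'
def pvALoop (lang_prefix : String) : List (String × String) → Option String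
  | [] => none
  | (k, v) :: rest => if pvPrefix k = lang_prefix then some v else pvALoop lang_prefix rest

def find_best_translation_py (translations : List (String × String)) (locale : String) : String :=
  -- 'if locale in translations: return translations[locale]' (first-match lookup)
  match translations.find? (fun kv => kv.1 == locale) with
  | some kv => kv.2
  | none =>
    let lang_prefix := pvPrefix locale
    match pvALoop lang_prefix translations with
    | some v => v
    | none => (translations.map (·.2)).headD ""  -- next(iter(translations.values())); raises on []: excluded by Pre_

-- ===== PORT B =====
-- score = 2 if key == locale else 1 if key.split('-')[0] == lang_prefix else 0
def pvScore (locale lang_prefix key : String) : Int :=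
  if key = locale then 2 else if pvPrefix key = lang_prefix then 1 else 0

-- the body of B's loop: keep the first entry with a strictly higher score
def pvStep (locale lang_prefix : String) (acc : Int × Option String) (kv : String × String) : Int × Option String :=
  let s := pvScore locale lang_prefix kv.1
  if acc.1 < s then (s, some kv.2) else acc

def find_best_translation_py_alt (translations : List (String × String)) (locale : String) : String :=
  let lang_prefix := pvPrefix locale
  let best := translations.foldl (pvStep locale lang_prefix) (-1, (none : Option String))
  match best.2 with
  | some v => v
  | none => (translations.map (·.2)).headD ""  -- next(iter(translations.values())); raises on []: excluded by Pre_

-- ===== PRECONDITION & SPEC =====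
-- Pre_ excludes only the empty dict, on which both A and B raise StopIteration.
def Pre_find_best_translation_py (translations : List (String × String)) (locale : String) : Prop := translations ≠ []
instance (translations : List (String × String)) (locale : String) : Decidable (Pre_find_best_translation_py translations locale) := by unfold Pre_find_best_translation_py; infer_instance

def pvWitness_find_best_translation_py : (List (String × String)) × String := ([("en-US", "hello"), ("fr-FR", "bonjour")], "fr-CA")

def Spec_find_best_translation_py (translations : List (String × String)) (locale : String) (out : String) : Prop := out = find_best_translation_py_alt translations locale
instance (translations : List (String × String)) (locale : String) (out : String) : Decidable (Spec_find_best_translation_py translations locale out) := by unfold Spec_find_best_translation_py; infer_instance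

-- ===== CLAIM (what is proved, stated in full; the proofs are below) =====
def Claim_equal_find_best_translation_py : Prop := ∀ (translations : List (String × String)) (locale : String), Dom_find_best_translation_py translations locale → Pre_find_best_translation_py translations locale → Spec_find_best_translation_py translations locale (find_best_translation_py translations locale)

-- ===== LEMMAS AND PROOFS =====

-- once the best score is 2 (an exact match was seen) the fold never updates again
lemma pvStay2 (locale lang_prefix : String) (v : Option String) :
    ∀ L : List (String × String), L.foldl (pvStep locale lang_prefix) (2, v) = (2, v) := by
  intro L
  induction L with
  | nil => rfl
  | cons kv rest ih =>
      have h : pvStep locale lang_prefix (2, v) kv = (2, v) := by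
        simp only [pvStep, pvScore]
        split_ifs <;> simp_all
      simp [List.foldl, h, ih]

-- from best score 1, only the first exact match can still win
lemma pvFrom1 (locale lang_prefix : String) :
    ∀ (L : List (String × String)) (v : String),
      (L.foldl (pvStep locale lang_prefix) (1, some v)).2 =
        match L.find? (fun kv => kv.1 == locale) with
        | some kv => some kv.2
        | none => some v := by
  intro L
  induction L with
  | nil => intro v; rfl
  | cons kv rest ih =>
      intro v
      by_cases hx : kv.1 = locale
      · have hstep : pvStep locale lang_prefix (1, some v) kv = (2, some kv.2) := by
          simp [pvStep, pvScore, hx]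
        rw [List.foldl_cons, hstep, pvStay2,
            List.find?_cons_of_pos (by simpa using hx)]
      · have hstep : pvStep locale lang_prefix (1, some v) kv = (1, some v) := by
          simp only [pvStep, pvScore, if_neg hx]
          split_ifs <;> simp_all
        rw [List.foldl_cons, hstep, ih,
            List.find?_cons_of_neg (by simpa using hx)]

-- from best score 0, the winner is the first exact match, else the first prefix match, else the current value
lemma pvFrom0 (locale lang_prefix : String) :
    ∀ (L : List (String × String)) (v : String),
      (L.foldl (pvStep locale lang_prefix) (0, some v)).2 =
        match L.find? (fun kv => kv.1 == locale) with
        | some kv => some kv.2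
        | none =>
          match pvALoop lang_prefix L with
          | some w => some w
          | none => some v := by
  intro L
  induction L with
  | nil => intro v; rfl
  | cons kv rest ih =>
      intro v
      obtain ⟨k, w⟩ := kv
      by_cases hx : k = locale
      · have hstep : pvStep locale lang_prefix (0, some v) (k, w) = (2, some w) := by
          simp [pvStep, pvScore, hx]
        rw [List.foldl_cons, hstep, pvStay2,
            List.find?_cons_of_pos (by simpa using hx)]
      · by_cases hp : pvPrefix k = lang_prefix
        · have hstep : pvStep locale lang_prefix (0, some v) (k, w) = (1, some w) := by
            simp [pvStep, pvScore, hx, hp]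
          rw [List.foldl_cons, hstep, pvFrom1,
              List.find?_cons_of_neg (by simpa using hx)]
          simp [pvALoop, hp]
        · have hstep : pvStep locale lang_prefix (0, some v) (k, w) = (0, some v) := by
            simp [pvStep, pvScore, hx, hp]
          rw [List.foldl_cons, hstep, ih,
              List.find?_cons_of_neg (by simpa using hx)]
          simp [pvALoop, hp]

-- ===== VERDICT (by name: the statement is the Claim_ definition above) =====
theorem find_best_translation_py_spec : Claim_equal_find_best_translation_py := by
  intro translations locale _ hpre
  unfold Spec_find_best_translation_py
  match translations with
  | [] => exact absurd rfl hpre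
  | (k, v) :: rest =>
    simp only [find_best_translation_py, find_best_translation_py_alt]
    by_cases hx : k = locale
    · have hstep : pvStep locale (pvPrefix locale) (-1, none) (k, v) = (2, some v) := by
        simp [pvStep, pvScore, hx]
      rw [List.foldl_cons, hstep, pvStay2,
          List.find?_cons_of_pos (by simpa using hx)]
    · by_cases hp : pvPrefix k = pvPrefix locale
      · have hstep : pvStep locale (pvPrefix locale) (-1, none) (k, v) = (1, some v) := by
          simp [pvStep, pvScore, hx, hp]
        rw [List.foldl_cons, hstep, pvFrom1,
            List.find?_cons_of_neg (by simpa using hx)]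
        simp only [pvALoop, hp, if_pos]
        split <;> simp
      · have hstep : pvStep locale (pvPrefix locale) (-1, none) (k, v) = (0, some v) := by
          simp [pvStep, pvScore, hx, hp]
        rw [List.foldl_cons, hstep, pvFrom0,
            List.find?_cons_of_neg (by simpa using hx)]
        cases hA : pvALoop (pvPrefix locale) rest <;> simp [pvALoop, hp, hA] <;> split <;> rfl
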